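-- pv_equiv track=rewrite | github.com/SquirtlesAlgorithmStudy/SquirtlesAlgorithmStudy-Hard | 현중/삼성기출2024상반기오전1번.py | count_clear
-- ===== SOURCE A (Python) =====
-- def bfs(arr, visited, si, sj, clear):
--     queue = []
--     cnt =0
--     sset = set()
--
--     queue.append((si,sj))
--     visited[si][sj] =1
--     sset.add((si, sj))
--     cnt +=1
--
--     while queue:
--         ci, cj = queue.pop(0)
--         #4방향, 범위내, 미방문, 같은값이면
--         for di,dj in ((-1,0),(1,0),(0,-1),(0,1)):
--             ni, nj = ci+di, cj+dj
--             if 0<=ni<5 and 0<=nj<5 and visited[ni][nj] ==0 and arr[ci][cj] == arr[ni][nj]: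
--                 queue.append((ni,nj))
--                 visited[ni][nj] =1
--                 sset.add((ni, nj))
--                 cnt +=1
--
--     if cnt >=3: #유물이면 cnt return + clear ==1이면 0으로 clear
--         if clear ==1:
--             for i,j in sset:
--                 arr[i][j] =0
--
--         return cnt
--     return 0 # cnt가 0,1,2 이라면
--
-- def count_clear(arr, clear): #clear ==1인 경우 3개 이상값들을 bfs를 이용하여 0으로 clear
--     visited = [[0]*5 for _ in range(5)] # 5x5
--     cnt = 0
--     for i in range(5): #미방문인 경우 같은 값이면 fill
--         for j in range(5):
--             if visited[i][j] ==0: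
--                 tmp = bfs(arr, visited, i, j, clear) # 같은 값이면 , 3개 이상인 경우 return, clear
--                 cnt += tmp
--     return cnt
-- ===== SOURCE B (Python) =====
-- def count_clear(arr, clear):
--     # Per-cell fixpoint closure on the ORIGINAL values: a cell belongs to the answer
--     # iff its connected same-value component has size >= 3; the answer is the number
--     # of such cells (= sum of qualifying component sizes). Clearing happens afterwards.
--     big = []
--     for i in range(5):
--         for j in range(5):
--             comp = {(i, j)}
--             for _ in range(25):
--                 comp = comp | {(ci + di, cj + dj)
--                                for (ci, cj) in comp
--                                for (di, dj) in ((-1, 0), (1, 0), (0, -1), (0, 1))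
--                                if 0 <= ci + di < 5 and 0 <= cj + dj < 5
--                                and arr[ci + di][cj + dj] == arr[ci][cj]}
--             if len(comp) >= 3:
--                 big.append((i, j))
--     if clear == 1:
--         for (i, j) in big:
--             arr[i][j] = 0
--     return len(big)
-- ===== Notes on version B (the rewrite author's own statement) =====
-- stated objective: alternative
-- what changed: Replaces the shared-visited BFS flood fill that sums qualifying component sizes by an independent per-cell fixpoint closure on the original values, counting the cells that lie in a same-value component of size >= 3 (and clearing only after all components are known).
import Mathlib
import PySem

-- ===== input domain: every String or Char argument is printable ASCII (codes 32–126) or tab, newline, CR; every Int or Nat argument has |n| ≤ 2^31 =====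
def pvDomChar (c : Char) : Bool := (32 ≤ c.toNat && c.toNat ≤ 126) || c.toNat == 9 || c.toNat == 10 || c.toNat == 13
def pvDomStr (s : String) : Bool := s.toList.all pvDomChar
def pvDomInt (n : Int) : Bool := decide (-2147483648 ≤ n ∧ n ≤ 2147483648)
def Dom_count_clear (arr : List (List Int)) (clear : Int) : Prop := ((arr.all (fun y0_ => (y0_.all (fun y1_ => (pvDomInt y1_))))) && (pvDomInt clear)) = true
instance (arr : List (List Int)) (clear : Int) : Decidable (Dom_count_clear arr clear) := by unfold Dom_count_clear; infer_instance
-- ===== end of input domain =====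

-- B replaces A's shared-visited BFS flood fill (summing qualifying component sizes) by an
-- independent per-cell fixpoint closure on the original values, counting the cells that lie in a
-- same-value component of size >= 3; a different decomposition at similar cost on the fixed 5x5
-- grid. Both Pythons also clear the qualifying cells of arr in place (same cells, same final arr);
-- the theorems are about the returned int only.


-- ===== PORT A =====

-- m[i][j] (read), as the two chained Python indexings
def pvGet2 (m : List (List Int)) (i j : Int) : Option Int :=
  (PySem.List.pyGet? m i).bind (fun r => PySem.List.pyGet? r j)

-- m[i][j] = v (write; used only with in-range non-negative indices, where pySetD is exact)
def pvSet2 (m : List (List Int)) (i j v : Int) : List (List Int) :=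
  PySem.List.pySetD m i (PySem.List.pySetD (PySem.List.pyGetD m i []) j v)

def pvDirs : List (Int × Int) := [(-1, 0), (1, 0), (0, -1), (0, 1)]

-- the body of A's 'while queue' loop; the fuel only makes the recursion total (128 is never
-- exhausted on the 5x5 grid: the loop pops at most 26 times, proved below)
def bfsLoopA (arr : List (List Int)) (fuel : Nat) (visited : List (List Int))
    (queue : List (Int × Int)) (sset : PySem.Set (Int × Int)) (cnt : Int) :
    List (List Int) × PySem.Set (Int × Int) × Int :=
  match fuel, queue with
  | 0, _ => (visited, sset, cnt)
  | _ + 1, [] => (visited, sset, cnt)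
  | fuel + 1, (ci, cj) :: rest =>
    let st := pvDirs.foldl (fun st d =>
      let ni := ci + d.1
      let nj := cj + d.2
      if 0 ≤ ni ∧ ni < 5 ∧ 0 ≤ nj ∧ nj < 5 ∧ pvGet2 st.1 ni nj = some 0 ∧
          pvGet2 arr ci cj = pvGet2 arr ni nj then
        (pvSet2 st.1 ni nj 1, st.2.1 ++ [(ni, nj)], PySem.Set.add st.2.2.1 (ni, nj), st.2.2.2 + 1)
      else st) (visited, rest, sset, cnt)
    bfsLoopA arr fuel st.1 st.2.1 st.2.2.1 st.2.2.2

-- A's bfs: returns (arr', visited', ret)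
def bfsA (arr visited : List (List Int)) (si sj clear : Int) :
    List (List Int) × List (List Int) × Int :=
  let visited1 := pvSet2 visited si sj 1
  let sset : PySem.Set (Int × Int) := PySem.Set.add PySem.Set.empty (si, sj)
  let r := bfsLoopA arr 128 visited1 [(si, sj)] sset 1
  if r.2.2 ≥ 3 then
    if clear = 1 then
      (r.2.1.foldl (fun a (p : Int × Int) => pvSet2 a p.1 p.2 0) arr, r.1, r.2.2)
    else (arr, r.1, r.2.2)
  else (arr, r.1, 0)

def count_clear (arr : List (List Int)) (clear : Int) : Int :=
  let visited : List (List Int) := (PySem.List.pyRange 0 5 1).map (fun _ => List.replicate 5 0)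
  let st := (PySem.List.pyRange 0 5 1).foldl (fun st i =>
    (PySem.List.pyRange 0 5 1).foldl (fun st j =>
      if pvGet2 st.2.1 i j = some 0 then
        let r := bfsA st.1 st.2.1 i j clear
        (r.1, r.2.1, st.2.2 + r.2.2)
      else st) st) (arr, visited, (0 : Int))
  st.2.2

-- ===== PORT B =====

-- one round of B's 'comp |= {neighbour comprehension}'
def closStepB (arr : List (List Int)) (s : PySem.Set (Int × Int)) : PySem.Set (Int × Int) :=
  PySem.Set.union s (s.flatMap (fun c => pvDirs.filterMap (fun d =>
    if 0 ≤ c.1 + d.1 ∧ c.1 + d.1 < 5 ∧ 0 ≤ c.2 + d.2 ∧ c.2 + d.2 < 5 ∧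
        pvGet2 arr (c.1 + d.1) (c.2 + d.2) = pvGet2 arr c.1 c.2 then
      some (c.1 + d.1, c.2 + d.2)
    else none)))

-- Source B's 25 closure rounds ('for _ in range(25)')
def compB (arr : List (List Int)) (i j : Int) : PySem.Set (Int × Int) :=
  (PySem.List.pyRange 0 25 1).foldl (fun s _ => closStepB arr s) (PySem.Set.ofList [(i, j)])

-- _arrCleared mirrors Source B's in-place clearing of arr (a side effect, not part of the return)
def count_clear_alt (arr : List (List Int)) (clear : Int) : Int :=
  let big := (PySem.List.pyRange 0 5 1).foldl (fun acc i =>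
    (PySem.List.pyRange 0 5 1).foldl (fun acc j =>
      if PySem.Set.len (compB arr i j) ≥ 3 then acc ++ [(i, j)] else acc) acc) []
  let _arrCleared := if clear = 1 then
      big.foldl (fun a (p : Int × Int) => pvSet2 a p.1 p.2 0) arr
    else arr
  (PySem.List.len big)

-- ===== PRECONDITION & SPEC =====
-- Pre_ = exactly the inputs on which Python A returns (no IndexError): at least 5 rows, the first
-- five rows each at least 5 entries wide; both Pythons raise IndexError otherwise.
def Pre_count_clear (arr : List (List Int)) (clear : Int) : Prop :=
  5 ≤ arr.length ∧ ∀ r ∈ arr.take 5, 5 ≤ r.length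
instance (arr : List (List Int)) (clear : Int) : Decidable (Pre_count_clear arr clear) := by
  unfold Pre_count_clear; infer_instance

def pvWitness_count_clear : List (List Int) × Int :=
  ([[1, 1, 1, 2, 3], [4, 5, 6, 7, 8], [9, 9, 1, 2, 3], [4, 5, 6, 7, 8], [9, 1, 2, 3, 4]], 1)

def Spec_count_clear (arr : List (List Int)) (clear : Int) (out : Int) : Prop := out = count_clear_alt arr clear
instance (arr : List (List Int)) (clear : Int) (out : Int) : Decidable (Spec_count_clear arr clear out) := by unfold Spec_count_clear; infer_instance

-- ===== CLAIM (what is proved, stated in full; the proofs are below) =====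
def Claim_equal_count_clear : Prop := ∀ (arr : List (List Int)) (clear : Int), Dom_count_clear arr clear → Pre_count_clear arr clear → Spec_count_clear arr clear (count_clear arr clear)

-- ===== LEMMAS AND PROOFS =====

def pvGridL : List (Int × Int) :=
  (List.range 5).flatMap (fun i => (List.range 5).map (fun j => ((i : Int), (j : Int))))
def pvGrid : Finset (Int × Int) := pvGridL.toFinset

theorem mem_pvGrid (p : Int × Int) : p ∈ pvGrid ↔ 0 ≤ p.1 ∧ p.1 < 5 ∧ 0 ≤ p.2 ∧ p.2 < 5 := by
  constructor
  · intro h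
    simp [pvGrid, pvGridL] at h
    obtain ⟨i, hi, j, hj, h⟩ := h
    subst h; simp; omega
  · intro ⟨h1, h2, h3, h4⟩
    simp [pvGrid, pvGridL]
    exact ⟨p.1.toNat, by omega, p.2.toNat, by omega, by simp [Prod.ext_iff]; omega⟩

theorem pvGrid_card : pvGrid.card = 25 := by decide

abbrev pvAdj (arr : List (List Int)) (p q : Int × Int) : Prop :=
  p ∈ pvGrid ∧ q ∈ pvGrid ∧ (q.1 - p.1, q.2 - p.2) ∈ pvDirs ∧
    pvGet2 arr p.1 p.2 = pvGet2 arr q.1 q.2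

theorem pvAdj_symm {arr : List (List Int)} {p q : Int × Int} (h : pvAdj arr p q) : pvAdj arr q p := by
  obtain ⟨h1, h2, h3, h4⟩ := h
  refine ⟨h2, h1, ?_, h4.symm⟩
  simp [pvDirs] at h3 ⊢
  omega

def pvF (arr : List (List Int)) (S : Finset (Int × Int)) : Finset (Int × Int) :=
  S ∪ pvGrid.filter (fun n => ∃ c ∈ S, pvAdj arr c n)

def pvClosed (arr : List (List Int)) (S : Finset (Int × Int)) : Prop :=
  ∀ p ∈ S, ∀ q, pvAdj arr p q → q ∈ S

def pvComp (arr : List (List Int)) (p : Int × Int) : Finset (Int × Int) := (pvF arr)^[25] {p}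

theorem subset_pvF (arr : List (List Int)) (S : Finset (Int × Int)) : S ⊆ pvF arr S :=
  Finset.subset_union_left

theorem pvF_subset {arr : List (List Int)} {S T : Finset (Int × Int)} (hT : pvClosed arr T)
    (h : S ⊆ T) : pvF arr S ⊆ T := by
  intro x hx
  rcases Finset.mem_union.1 hx with hx | hx
  · exact h hx
  · obtain ⟨-, c, hc, hadj⟩ := Finset.mem_filter.1 hx |>.imp id (fun h => h)
    exact hT c (h hc) x hadj

theorem pvF_subset_grid {arr : List (List Int)} {S : Finset (Int × Int)} (h : S ⊆ pvGrid) :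
    pvF arr S ⊆ pvGrid := by
  intro x hx
  rcases Finset.mem_union.1 hx with hx | hx
  · exact h hx
  · exact (Finset.mem_filter.1 hx).1

theorem pvComp_subset_grid {arr : List (List Int)} {p : Int × Int} (hp : p ∈ pvGrid) :
    pvComp arr p ⊆ pvGrid := by
  have : ∀ n, (pvF arr)^[n] {p} ⊆ pvGrid := by
    intro n
    induction n with
    | zero => simpa using hp
    | succ n ih => rw [Function.iterate_succ_apply']; exact pvF_subset_grid ih
  exact this 25

theorem mem_pvComp_self (arr : List (List Int)) (p : Int × Int) : p ∈ pvComp arr p := by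
  have : ∀ n, p ∈ (pvF arr)^[n] {p} := by
    intro n
    induction n with
    | zero => simp
    | succ n ih => rw [Function.iterate_succ_apply']; exact subset_pvF arr _ ih
  exact this 25

theorem pvComp_min {arr : List (List Int)} {p : Int × Int} {T : Finset (Int × Int)}
    (hT : pvClosed arr T) (hp : p ∈ T) : pvComp arr p ⊆ T := by
  have : ∀ n, (pvF arr)^[n] {p} ⊆ T := by
    intro n
    induction n with
    | zero => simpa using hp
    | succ n ih => rw [Function.iterate_succ_apply']; exact pvF_subset hT ih
  exact this 25

theorem pvComp_closed {arr : List (List Int)} {p : Int × Int} (hp : p ∈ pvGrid) :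
    pvClosed arr (pvComp arr p) := by
  -- find a fixpoint stage k < 25
  have hsub : ∀ n, (pvF arr)^[n] {p} ⊆ (pvF arr)^[n+1] {p} := by
    intro n
    rw [Function.iterate_succ_apply']
    exact subset_pvF arr _
  have hgrid : ∀ n, (pvF arr)^[n] {p} ⊆ pvGrid := by
    intro n
    induction n with
    | zero => simpa using hp
    | succ n ih => rw [Function.iterate_succ_apply']; exact pvF_subset_grid ih
  by_cases hfix : ∃ k < 25, (pvF arr)^[k+1] {p} = (pvF arr)^[k] {p}
  · obtain ⟨k, hk, hfixk⟩ := hfix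
    have stab : ∀ j, (pvF arr)^[k + j] {p} = (pvF arr)^[k] {p} := by
      intro j
      induction j with
      | zero => rfl
      | succ j ih =>
        have he : k + (j + 1) = (k + j) + 1 := by omega
        calc (pvF arr)^[k + (j + 1)] {p} = pvF arr ((pvF arr)^[k + j] {p}) := by
              rw [he, Function.iterate_succ_apply']
          _ = pvF arr ((pvF arr)^[k] {p}) := by rw [ih]
          _ = (pvF arr)^[k + 1] {p} := (Function.iterate_succ_apply' _ _ _).symm
          _ = (pvF arr)^[k] {p} := hfixk
    have h25 : pvComp arr p = (pvF arr)^[k] {p} := by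
      have := stab (25 - k)
      have hkk : k + (25 - k) = 25 := by omega
      rw [hkk] at this
      exact this
    have hfx : pvF arr (pvComp arr p) = pvComp arr p := by
      calc pvF arr (pvComp arr p) = pvF arr ((pvF arr)^[k] {p}) := by rw [h25]
        _ = (pvF arr)^[k + 1] {p} := (Function.iterate_succ_apply' _ _ _).symm
        _ = (pvF arr)^[k] {p} := hfixk
        _ = pvComp arr p := h25.symm
    intro x hx q hq
    rw [← hfx]
    apply Finset.mem_union_right
    exact Finset.mem_filter.2 ⟨hq.2.1, x, hx, hq⟩
  · -- cards strictly grow: impossible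
    push Not at hfix
    have grow : ∀ k, k ≤ 25 → k + 1 ≤ ((pvF arr)^[k] {p}).card := by
      intro k hk
      induction k with
      | zero => simp
      | succ k ih =>
        have h1 : k + 1 ≤ ((pvF arr)^[k] {p}).card := ih (by omega)
        have h2 : (pvF arr)^[k] {p} ⊂ (pvF arr)^[k+1] {p} :=
          lt_of_le_of_ne (hsub k) (fun h => hfix k (by omega) h.symm)
        have := Finset.card_lt_card h2
        omega
    have h1 := grow 25 le_rfl
    have h2 := Finset.card_le_card (hgrid 25)
    rw [pvGrid_card] at h2
    omega

theorem pvComp_classes {arr : List (List Int)} {p q : Int × Int} (hp : p ∈ pvGrid)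
    (hq : q ∈ pvComp arr p) : pvComp arr q = pvComp arr p := by
  have hqg : q ∈ pvGrid := pvComp_subset_grid hp hq
  apply Finset.Subset.antisymm
  · exact pvComp_min (pvComp_closed hp) hq
  · -- p ∈ pvComp arr q, via the closed set {x ∈ grid | p ∈ pvComp arr x}
    have key : pvComp arr p ⊆ pvGrid.filter (fun x => p ∈ pvComp arr x) := by
      apply pvComp_min
      · intro x hx y hxy
        have hxg := (Finset.mem_filter.1 hx).1
        have hpx := (Finset.mem_filter.1 hx).2
        have hyg : y ∈ pvGrid := hxy.2.1
        have hxy' : x ∈ pvComp arr y := by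
          have := pvComp_closed hyg y (mem_pvComp_self arr y) x (pvAdj_symm hxy)
          exact this
        have : pvComp arr x ⊆ pvComp arr y := pvComp_min (pvComp_closed hyg) hxy'
        exact Finset.mem_filter.2 ⟨hyg, this hpx⟩
      · exact Finset.mem_filter.2 ⟨hp, mem_pvComp_self arr p⟩
    have := key hq
    have hpq : p ∈ pvComp arr q := (Finset.mem_filter.1 this).2
    exact pvComp_min (pvComp_closed hqg) hpq

def Shape5 (m : List (List Int)) : Prop := m.length = 5 ∧ ∀ r ∈ m, r.length = 5

def PreShape (m : List (List Int)) : Prop :=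
  5 ≤ m.length ∧ ∀ i : Nat, i < 5 → 5 ≤ (m.getD i []).length

theorem pvGet2_nonneg (m : List (List Int)) (i j : Int) (hi : 0 ≤ i) (hj : 0 ≤ j) :
    pvGet2 m i j = (m[i.toNat]?).bind (fun r => r[j.toNat]?) := by
  simp only [pvGet2, PySem.List.pyGet?_of_nonneg _ hi]
  cases m[i.toNat]? with
  | none => rfl
  | some r => simp only [Option.bind_some, PySem.List.pyGet?_of_nonneg _ hj]

theorem pvSet2_nonneg (m : List (List Int)) (i j v : Int) (hi : 0 ≤ i) (hj : 0 ≤ j) :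
    pvSet2 m i j v = m.set i.toNat ((m.getD i.toNat []).set j.toNat v) := by
  simp only [pvSet2, PySem.List.pySetD_of_nonneg _ _ hi, PySem.List.pySetD_of_nonneg _ _ hj,
    PySem.List.pyGetD, PySem.List.pyGet?_of_nonneg _ hi]
  rfl

theorem length_pvSet2 (m : List (List Int)) (i j v : Int) (hi : 0 ≤ i) (hj : 0 ≤ j) :
    (pvSet2 m i j v).length = m.length := by
  rw [pvSet2_nonneg m i j v hi hj]; simp

theorem getD_pvSet2 (m : List (List Int)) (i j v : Int) (hi : 0 ≤ i) (hj : 0 ≤ j) (k : Nat) :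
    ((pvSet2 m i j v).getD k []).length = (m.getD k []).length := by
  rw [pvSet2_nonneg m i j v hi hj]
  simp only [List.getD, List.getElem?_set]
  by_cases hik : i.toNat = k
  · subst hik
    by_cases hlt : i.toNat < m.length
    · simp [hlt]
    · simp [hlt]
  · simp [hik]

theorem pvGet2_pvSet2 (m : List (List Int)) (i j i' j' v : Int)
    (hi : 0 ≤ i) (hj : 0 ≤ j) (hi' : 0 ≤ i') (hj' : 0 ≤ j')
    (hil : i.toNat < m.length) (hjl : j.toNat < (m.getD i.toNat []).length) :
    pvGet2 (pvSet2 m i j v) i' j' =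
      if i' = i ∧ j' = j then some v else pvGet2 m i' j' := by
  rw [pvSet2_nonneg m i j v hi hj, pvGet2_nonneg _ _ _ hi' hj', pvGet2_nonneg _ _ _ hi' hj']
  have hrow : m[i.toNat]? = some (m.getD i.toNat []) := by
    simp [List.getD, List.getElem?_eq_getElem hil]
  by_cases hii : i'.toNat = i.toNat
  · have hii' : i' = i := by omega
    rw [show i'.toNat = i.toNat from hii, List.getElem?_set_self (by omega)]
    by_cases hjj : j'.toNat = j.toNat
    · have hjj' : j' = j := by omega
      simp only [hii', hjj', and_self, if_true, Option.bind_some]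
      rw [List.getElem?_set_self (by omega)]
    · have hjj' : ¬(j' = j) := by omega
      simp only [hii', hjj', and_false, if_false, Option.bind_some]
      rw [List.getElem?_set_ne (by omega), hrow]
      rfl
  · have hii' : ¬(i' = i) := by omega
    simp only [hii', false_and, if_false]
    rw [List.getElem?_set_ne (by omega)]

def pvVisSet (vis : List (List Int)) : Finset (Int × Int) :=
  pvGrid.filter (fun p => ¬ (pvGet2 vis p.1 p.2 = some 0))

theorem Shape5_pvSet2 {vis : List (List Int)} (hS : Shape5 vis) {p : Int × Int}
    (hp : p ∈ pvGrid) (v : Int) : Shape5 (pvSet2 vis p.1 p.2 v) := by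
  obtain ⟨hg1, hg2, hg3, hg4⟩ := (mem_pvGrid p).1 hp
  constructor
  · rw [length_pvSet2 _ _ _ _ hg1 hg3]; exact hS.1
  · intro r hr
    have : ∀ k : Nat, k < 5 → ((pvSet2 vis p.1 p.2 v).getD k []).length = 5 := by
      intro k hk
      rw [getD_pvSet2 _ _ _ _ hg1 hg3]
      have h5 := hS.1
      have hk' : k < vis.length := by omega
      have : vis.getD k [] = vis[k] := by simp [List.getD, List.getElem?_eq_getElem hk']
      rw [this]
      exact hS.2 _ (List.getElem_mem hk')
    obtain ⟨k, hk, hrk⟩ := List.mem_iff_getElem.1 hr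
    have hlen : (pvSet2 vis p.1 p.2 v).length = 5 := by
      rw [length_pvSet2 _ _ _ _ hg1 hg3]; exact hS.1
    have hk5 : k < 5 := by omega
    have := this k hk5
    rw [List.getD, List.getElem?_eq_getElem hk, Option.getD_some, hrk] at this
    exact this

theorem shape_row {vis : List (List Int)} (hS : Shape5 vis) {p : Int × Int} (hp : p ∈ pvGrid) :
    p.1.toNat < vis.length ∧ p.2.toNat < (vis.getD p.1.toNat []).length := by
  obtain ⟨hg1, hg2, hg3, hg4⟩ := (mem_pvGrid p).1 hp
  have h5 := hS.1
  have h1 : p.1.toNat < vis.length := by omega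
  refine ⟨h1, ?_⟩
  have : vis.getD p.1.toNat [] = vis[p.1.toNat] := by
    simp [List.getD, List.getElem?_eq_getElem h1]
  rw [this]
  have := hS.2 _ (List.getElem_mem h1)
  omega

theorem preshape_row {m : List (List Int)} (hS : PreShape m) {p : Int × Int} (hp : p ∈ pvGrid) :
    p.1.toNat < m.length ∧ p.2.toNat < (m.getD p.1.toNat []).length := by
  obtain ⟨hg1, hg2, hg3, hg4⟩ := (mem_pvGrid p).1 hp
  have h5 := hS.1
  have h1 : p.1.toNat < m.length := by omega
  have h2 := hS.2 p.1.toNat (by omega)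
  exact ⟨h1, by omega⟩

theorem PreShape_pvSet2 {m : List (List Int)} (hS : PreShape m) {p : Int × Int}
    (hp : p ∈ pvGrid) (v : Int) : PreShape (pvSet2 m p.1 p.2 v) := by
  obtain ⟨hg1, hg2, hg3, hg4⟩ := (mem_pvGrid p).1 hp
  constructor
  · rw [length_pvSet2 _ _ _ _ hg1 hg3]; exact hS.1
  · intro i hi
    rw [getD_pvSet2 _ _ _ _ hg1 hg3]
    exact hS.2 i hi

theorem pvGet2_isSome_of_shape {vis : List (List Int)} (hS : Shape5 vis) {p : Int × Int}
    (hp : p ∈ pvGrid) : ∃ v, pvGet2 vis p.1 p.2 = some v := by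
  obtain ⟨hg1, hg2, hg3, hg4⟩ := (mem_pvGrid p).1 hp
  obtain ⟨h1, h2⟩ := shape_row hS hp
  rw [pvGet2_nonneg _ _ _ hg1 hg3]
  have hrow : vis[p.1.toNat]? = some (vis.getD p.1.toNat []) := by
    simp [List.getD, List.getElem?_eq_getElem h1]
  rw [hrow]
  simp only [Option.bind_some]
  exact ⟨_, List.getElem?_eq_getElem h2⟩

theorem mem_pvVisSet (vis : List (List Int)) (q : Int × Int) :
    q ∈ pvVisSet vis ↔ q ∈ pvGrid ∧ ¬ (pvGet2 vis q.1 q.2 = some 0) := by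
  simp [pvVisSet]

theorem notmem_pvVisSet {vis : List (List Int)} (hS : Shape5 vis) {p : Int × Int}
    (hp : p ∈ pvGrid) : p ∉ pvVisSet vis ↔ pvGet2 vis p.1 p.2 = some 0 := by
  obtain ⟨v, hv⟩ := pvGet2_isSome_of_shape hS hp
  rw [mem_pvVisSet]
  simp [hp, hv]

theorem mem_pvVisSet_of_ne {vis : List (List Int)} {p : Int × Int} (hp : p ∈ pvGrid)
    (h : ¬ (pvGet2 vis p.1 p.2 = some 0)) : p ∈ pvVisSet vis :=
  (mem_pvVisSet vis p).2 ⟨hp, h⟩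

theorem pvVisSet_pvSet2_one {vis : List (List Int)} (hS : Shape5 vis) {p : Int × Int}
    (hp : p ∈ pvGrid) : pvVisSet (pvSet2 vis p.1 p.2 1) = insert p (pvVisSet vis) := by
  obtain ⟨hg1, hg2, hg3, hg4⟩ := (mem_pvGrid p).1 hp
  obtain ⟨h1, h2⟩ := shape_row hS hp
  ext q
  rw [mem_pvVisSet, Finset.mem_insert, mem_pvVisSet]
  constructor
  · intro ⟨hqg, hq⟩
    obtain ⟨hq1, hq2, hq3, hq4⟩ := (mem_pvGrid q).1 hqg
    rw [pvGet2_pvSet2 _ _ _ _ _ _ hg1 hg3 hq1 hq3 h1 h2] at hq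
    by_cases he : q.1 = p.1 ∧ q.2 = p.2
    · left; exact Prod.ext he.1 he.2
    · right
      rw [if_neg he] at hq
      exact ⟨hqg, hq⟩
  · intro h
    rcases h with h | h
    · subst h
      refine ⟨hp, ?_⟩
      rw [pvGet2_pvSet2 _ _ _ _ _ _ hg1 hg3 hg1 hg3 h1 h2, if_pos ⟨rfl, rfl⟩]
      simp
    · obtain ⟨hqg, hq⟩ := h
      obtain ⟨hq1, hq2, hq3, hq4⟩ := (mem_pvGrid q).1 hqg
      refine ⟨hqg, ?_⟩
      rw [pvGet2_pvSet2 _ _ _ _ _ _ hg1 hg3 hq1 hq3 h1 h2]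
      by_cases he : q.1 = p.1 ∧ q.2 = p.2
      · rw [if_pos he]; simp
      · rw [if_neg he]; exact hq

-- the union of the components of the already-processed cells
def pvU (arr : List (List Int)) (ps : List (Int × Int)) : Finset (Int × Int) :=
  ps.foldr (fun p acc => pvComp arr p ∪ acc) ∅

theorem mem_pvU (arr : List (List Int)) (ps : List (Int × Int)) (x : Int × Int) :
    x ∈ pvU arr ps ↔ ∃ p ∈ ps, x ∈ pvComp arr p := by
  induction ps with
  | nil => simp [pvU]
  | cons a t ih =>
    have hdef : pvU arr (a :: t) = pvComp arr a ∪ pvU arr t := rfl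
    rw [hdef, Finset.mem_union, ih]
    constructor
    · rintro (h | ⟨p, hp, h⟩)
      · exact ⟨a, by simp, h⟩
      · exact ⟨p, by simp [hp], h⟩
    · rintro ⟨p, hp, h⟩
      rcases List.mem_cons.1 hp with rfl | hp
      · exact Or.inl h
      · exact Or.inr ⟨p, hp, h⟩

theorem pvU_append (arr : List (List Int)) (ps : List (Int × Int)) (c : Int × Int) :
    pvU arr (ps ++ [c]) = pvU arr ps ∪ pvComp arr c := by
  ext x
  rw [Finset.mem_union, mem_pvU, mem_pvU]
  constructor
  · rintro ⟨p, hp, h⟩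
    rcases List.mem_append.1 hp with hp | hp
    · exact Or.inl ⟨p, hp, h⟩
    · rcases List.mem_singleton.1 hp with rfl
      exact Or.inr h
  · rintro (⟨p, hp, h⟩ | h)
    · exact ⟨p, List.mem_append_left _ hp, h⟩
    · exact ⟨c, List.mem_append_right _ (by simp), h⟩

theorem pvU_closed {arr : List (List Int)} {ps : List (Int × Int)}
    (h : ∀ p ∈ ps, p ∈ pvGrid) : pvClosed arr (pvU arr ps) := by
  intro x hx q hq
  obtain ⟨p, hp, hxp⟩ := (mem_pvU arr ps x).1 hx
  exact (mem_pvU arr ps q).2 ⟨p, hp, pvComp_closed (h p hp) x hxp q hq⟩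

theorem pvU_subset_grid {arr : List (List Int)} {ps : List (Int × Int)}
    (h : ∀ p ∈ ps, p ∈ pvGrid) : pvU arr ps ⊆ pvGrid := by
  intro x hx
  obtain ⟨p, hp, hxp⟩ := (mem_pvU arr ps x).1 hx
  exact pvComp_subset_grid (h p hp) hxp

theorem pvU_absorb {arr : List (List Int)} {ps : List (Int × Int)} {c : Int × Int}
    (hps : ∀ p ∈ ps, p ∈ pvGrid) (hc : c ∈ pvU arr ps) : pvComp arr c ⊆ pvU arr ps := by
  obtain ⟨p, hp, hcp⟩ := (mem_pvU arr ps c).1 hc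
  have hcls : pvComp arr c = pvComp arr p := pvComp_classes (hps p hp) hcp
  intro x hx
  exact (mem_pvU arr ps x).2 ⟨p, hp, hcls ▸ hx⟩

theorem pvU_disj {arr : List (List Int)} {ps : List (Int × Int)} {c : Int × Int}
    (hps : ∀ p ∈ ps, p ∈ pvGrid) (hcg : c ∈ pvGrid) (hc : c ∉ pvU arr ps) :
    ∀ x ∈ pvComp arr c, x ∉ pvU arr ps := by
  intro x hx hxU
  obtain ⟨p, hp, hxp⟩ := (mem_pvU arr ps x).1 hxU
  have h1 : pvComp arr x = pvComp arr c := pvComp_classes hcg hx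
  have h2 : pvComp arr x = pvComp arr p := pvComp_classes (hps p hp) hxp
  apply hc
  exact (mem_pvU arr ps c).2 ⟨p, hp, h2 ▸ h1.symm ▸ mem_pvComp_self arr c⟩

def AgreeOff (arr0 arrCur : List (List Int)) (U : Finset (Int × Int)) : Prop :=
  ∀ p ∈ pvGrid, p ∉ U → pvGet2 arrCur p.1 p.2 = pvGet2 arr0 p.1 p.2

-- clearing a list of grid cells only changes those cells
theorem clear_foldl (l : List (Int × Int)) :
    ∀ (a : List (List Int)), (∀ x ∈ l, x ∈ pvGrid) → PreShape a →
      PreShape (l.foldl (fun a (p : Int × Int) => pvSet2 a p.1 p.2 0) a) ∧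
      ∀ q ∈ pvGrid, q ∉ l →
        pvGet2 (l.foldl (fun a (p : Int × Int) => pvSet2 a p.1 p.2 0) a) q.1 q.2 =
          pvGet2 a q.1 q.2 := by
  induction l with
  | nil => intro a _ ha; exact ⟨ha, fun q _ _ => rfl⟩
  | cons x t ih =>
    intro a hl ha
    have hxg : x ∈ pvGrid := hl x (by simp)
    obtain ⟨hx1, hx2, hx3, hx4⟩ := (mem_pvGrid x).1 hxg
    have ha' : PreShape (pvSet2 a x.1 x.2 0) := PreShape_pvSet2 ha hxg 0
    obtain ⟨ihs, ihg⟩ := ih (pvSet2 a x.1 x.2 0) (fun y hy => hl y (by simp [hy])) ha'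
    refine ⟨ihs, ?_⟩
    intro q hqg hq
    obtain ⟨hq1, hq2, hq3, hq4⟩ := (mem_pvGrid q).1 hqg
    obtain ⟨hr1, hr2⟩ := preshape_row ha hxg
    rw [List.foldl_cons, ihg q hqg (fun h => hq (by simp [h])),
      pvGet2_pvSet2 _ _ _ _ _ _ hx1 hx3 hq1 hq3 hr1 hr2]
    have : ¬(q.1 = x.1 ∧ q.2 = x.2) := by
      intro ⟨h1, h2⟩
      exact hq (by simp [Prod.ext_iff, h1, h2])
    rw [if_neg this]

def BfsCore (arr0 : List (List Int)) (U : Finset (Int × Int)) (c : Int × Int)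
    (vis : List (List Int)) (ss : List (Int × Int)) (cnt : Int) : Prop :=
  Shape5 vis ∧ pvVisSet vis = U ∪ ss.toFinset ∧ ss.Nodup ∧
    (∀ x ∈ ss, x ∈ pvComp arr0 c) ∧ cnt = (ss.length : Int)

theorem bfs_fold (arr0 arrCur : List (List Int)) (U : Finset (Int × Int)) (c : Int × Int)
    (hagree : AgreeOff arr0 arrCur U) (hcg : c ∈ pvGrid)
    (hdisj : ∀ x ∈ pvComp arr0 c, x ∉ U) (ci cj : Int) :
    ∀ (dirs : List (Int × Int)), (∀ d ∈ dirs, d ∈ pvDirs) →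
    ∀ (vis : List (List Int)) (rest ss : List (Int × Int)) (cnt : Int),
      BfsCore arr0 U c vis ss cnt → (ci, cj) ∈ ss →
      ∃ Δ : List (Int × Int),
        (dirs.foldl (fun st d =>
          let ni := ci + d.1
          let nj := cj + d.2
          if 0 ≤ ni ∧ ni < 5 ∧ 0 ≤ nj ∧ nj < 5 ∧ pvGet2 st.1 ni nj = some 0 ∧
              pvGet2 arrCur ci cj = pvGet2 arrCur ni nj then
            (pvSet2 st.1 ni nj 1, st.2.1 ++ [(ni, nj)], PySem.Set.add st.2.2.1 (ni, nj),
              st.2.2.2 + 1)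
          else st) (vis, rest, ss, cnt)).2.1 = rest ++ Δ ∧
        (dirs.foldl (fun st d =>
          let ni := ci + d.1
          let nj := cj + d.2
          if 0 ≤ ni ∧ ni < 5 ∧ 0 ≤ nj ∧ nj < 5 ∧ pvGet2 st.1 ni nj = some 0 ∧
              pvGet2 arrCur ci cj = pvGet2 arrCur ni nj then
            (pvSet2 st.1 ni nj 1, st.2.1 ++ [(ni, nj)], PySem.Set.add st.2.2.1 (ni, nj),
              st.2.2.2 + 1)
          else st) (vis, rest, ss, cnt)).2.2.1 = ss ++ Δ ∧
        BfsCore arr0 U c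
          (dirs.foldl (fun st d =>
            let ni := ci + d.1
            let nj := cj + d.2
            if 0 ≤ ni ∧ ni < 5 ∧ 0 ≤ nj ∧ nj < 5 ∧ pvGet2 st.1 ni nj = some 0 ∧
                pvGet2 arrCur ci cj = pvGet2 arrCur ni nj then
              (pvSet2 st.1 ni nj 1, st.2.1 ++ [(ni, nj)], PySem.Set.add st.2.2.1 (ni, nj),
                st.2.2.2 + 1)
            else st) (vis, rest, ss, cnt)).1 (ss ++ Δ)
          (dirs.foldl (fun st d =>
            let ni := ci + d.1
            let nj := cj + d.2
            if 0 ≤ ni ∧ ni < 5 ∧ 0 ≤ nj ∧ nj < 5 ∧ pvGet2 st.1 ni nj = some 0 ∧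
                pvGet2 arrCur ci cj = pvGet2 arrCur ni nj then
              (pvSet2 st.1 ni nj 1, st.2.1 ++ [(ni, nj)], PySem.Set.add st.2.2.1 (ni, nj),
                st.2.2.2 + 1)
            else st) (vis, rest, ss, cnt)).2.2.2 ∧
        (∀ d ∈ dirs, pvAdj arr0 (ci, cj) (ci + d.1, cj + d.2) →
          (ci + d.1, cj + d.2) ∈ U ∪ (ss ++ Δ).toFinset) := by
  intro dirs
  induction dirs with
  | nil =>
    intro _ vis rest ss cnt hcore _
    exact ⟨[], by simp, by simp, by simpa using hcore, by simp⟩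
  | cons d dirs ih =>
    intro hdirs vis rest ss cnt hcore hci
    obtain ⟨hsh, hvs, hnd, hsub, hcnt⟩ := hcore
    have hcig : (ci, cj) ∈ pvGrid := pvComp_subset_grid hcg (hsub _ hci)
    have hciU : (ci, cj) ∉ U := hdisj _ (hsub _ hci)
    rw [List.foldl_cons]
    by_cases hg : 0 ≤ ci + d.1 ∧ ci + d.1 < 5 ∧ 0 ≤ cj + d.2 ∧ cj + d.2 < 5 ∧
        pvGet2 vis (ci + d.1) (cj + d.2) = some 0 ∧
        pvGet2 arrCur ci cj = pvGet2 arrCur (ci + d.1) (cj + d.2)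
    · obtain ⟨hb1, hb2, hb3, hb4, hfresh, hval⟩ := hg
      have hng : ((ci + d.1, cj + d.2) : Int × Int) ∈ pvGrid := by
        rw [mem_pvGrid]; exact ⟨hb1, hb2, hb3, hb4⟩
      have hnvis : ((ci + d.1, cj + d.2) : Int × Int) ∉ pvVisSet vis :=
        (notmem_pvVisSet hsh hng).2 hfresh
      rw [hvs] at hnvis
      have hnU : ((ci + d.1, cj + d.2) : Int × Int) ∉ U := fun h => hnvis (Finset.mem_union_left _ h)
      have hnss : ((ci + d.1, cj + d.2) : Int × Int) ∉ ss := fun h =>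
        hnvis (Finset.mem_union_right _ (List.mem_toFinset.2 h))
      -- the new cell is adjacent in the ORIGINAL grid, hence in the component
      have hadj : pvAdj arr0 (ci, cj) (ci + d.1, cj + d.2) := by
        refine ⟨hcig, hng, ?_, ?_⟩
        · have hd : d ∈ pvDirs := hdirs d (by simp)
          have : ((ci + d.1 - ci, cj + d.2 - cj) : Int × Int) = d := by
            apply Prod.ext <;> simp
          simpa [this] using hd
        · rw [← hagree _ hcig hciU, ← hagree _ hng hnU]
          exact hval
      have hncomp : ((ci + d.1, cj + d.2) : Int × Int) ∈ pvComp arr0 c :=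
        pvComp_closed hcg _ (hsub _ hci) _ hadj
      -- Set.add appends since the cell is fresh
      have hadd : PySem.Set.add ss (ci + d.1, cj + d.2) = ss ++ [(ci + d.1, cj + d.2)] := by
        simp [PySem.Set.add, hnss]
      have hcore1 : BfsCore arr0 U c (pvSet2 vis (ci + d.1) (cj + d.2) 1)
          (ss ++ [(ci + d.1, cj + d.2)]) (cnt + 1) := by
        refine ⟨Shape5_pvSet2 hsh hng 1, ?_, ?_, ?_, ?_⟩
        · rw [show pvSet2 vis (ci + d.1) (cj + d.2) 1 =
              pvSet2 vis ((ci + d.1, cj + d.2) : Int × Int).1 ((ci + d.1, cj + d.2) : Int × Int).2 1 from rfl,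
            pvVisSet_pvSet2_one hsh hng, hvs]
          ext y
          simp [or_comm, or_assoc]
        · rw [List.nodup_append]
          refine ⟨hnd, List.nodup_singleton _, ?_⟩
          intro x hx
          simp only [List.mem_singleton]
          intro y hy
          subst hy
          intro hxy
          exact hnss (hxy ▸ hx)
        · intro x hx
          rcases List.mem_append.1 hx with hx | hx
          · exact hsub x hx
          · rcases List.mem_singleton.1 hx with rfl
            exact hncomp
        · simp [hcnt]
      obtain ⟨Δ', e1, e2, e3, e4⟩ := ih (fun x hx => hdirs x (by simp [hx]))
        (pvSet2 vis (ci + d.1) (cj + d.2) 1) (rest ++ [(ci + d.1, cj + d.2)])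
        (ss ++ [(ci + d.1, cj + d.2)]) (cnt + 1) hcore1 (List.mem_append_left _ hci)
      refine ⟨(ci + d.1, cj + d.2) :: Δ', ?_, ?_, ?_, ?_⟩
      · rw [if_pos ⟨hb1, hb2, hb3, hb4, hfresh, hval⟩]
        simpa [hadd, List.append_assoc] using e1
      · rw [if_pos ⟨hb1, hb2, hb3, hb4, hfresh, hval⟩]
        simpa [hadd, List.append_assoc] using e2
      · rw [if_pos ⟨hb1, hb2, hb3, hb4, hfresh, hval⟩]
        simpa [hadd, List.append_assoc] using e3
      · intro d' hd' hadj'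
        rcases List.mem_cons.1 hd' with rfl | hd'
        · apply Finset.mem_union_right
          simp
        · simpa [List.append_assoc] using e4 d' hd' hadj'
    · obtain ⟨Δ', e1, e2, e3, e4⟩ := ih (fun x hx => hdirs x (by simp [hx]))
        vis rest ss cnt ⟨hsh, hvs, hnd, hsub, hcnt⟩ hci
      refine ⟨Δ', ?_, ?_, ?_, ?_⟩
      · rw [if_neg hg]; exact e1
      · rw [if_neg hg]; exact e2
      · rw [if_neg hg]; exact e3
      · intro d' hd' hadj'
        rcases List.mem_cons.1 hd' with rfl | hd'
        · -- the guard failed although the cell is adjacent: it is already visited,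
          -- or the value test failed, which contradicts adjacency off U
          have hng := hadj'.2.1
          obtain ⟨hb1, hb2, hb3, hb4⟩ := (mem_pvGrid _).1 hng
          by_cases hvisn : pvGet2 vis (ci + d'.1) (cj + d'.2) = some 0
          · by_cases hmem : ((ci + d'.1, cj + d'.2) : Int × Int) ∈ U ∪ ss.toFinset
            · rcases Finset.mem_union.1 hmem with h | h
              · exact Finset.mem_union_left _ h
              · apply Finset.mem_union_right
                rw [List.toFinset_append]
                exact Finset.mem_union_left _ h
            · exfalso
              have hnU : ((ci + d'.1, cj + d'.2) : Int × Int) ∉ U := fun h =>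
                hmem (Finset.mem_union_left _ h)
              have hval : pvGet2 arrCur ci cj = pvGet2 arrCur (ci + d'.1) (cj + d'.2) := by
                rw [hagree _ hadj'.1 hciU, hagree _ hng hnU]
                exact hadj'.2.2.2
              exact hg ⟨hb1, hb2, hb3, hb4, hvisn, hval⟩
          · have : ((ci + d'.1, cj + d'.2) : Int × Int) ∈ pvVisSet vis :=
              mem_pvVisSet_of_ne hng hvisn
            rw [hvs] at this
            rcases Finset.mem_union.1 this with h | h
            · exact Finset.mem_union_left _ h
            · apply Finset.mem_union_right
              rw [List.toFinset_append]
              exact Finset.mem_union_left _ h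
        · exact e4 d' hd' hadj'

theorem ss_len_le_25 {arr0 : List (List Int)} {c : Int × Int} {ss : List (Int × Int)}
    (hcg : c ∈ pvGrid) (hnd : ss.Nodup) (hsub : ∀ x ∈ ss, x ∈ pvComp arr0 c) :
    ss.length ≤ 25 := by
  have h1 : ss.toFinset.card = ss.length := List.toFinset_card_of_nodup hnd
  have h2 : ss.toFinset ⊆ pvGrid := by
    intro x hx
    exact pvComp_subset_grid hcg (hsub x (List.mem_toFinset.1 hx))
  have := Finset.card_le_card h2
  rw [pvGrid_card] at this
  omega

theorem bfs_terminal {arr0 : List (List Int)} {U : Finset (Int × Int)} {c : Int × Int}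
    (hUclosed : pvClosed arr0 U)
    (hdisj : ∀ x ∈ pvComp arr0 c, x ∉ U)
    {vis : List (List Int)} {ss : List (Int × Int)} {cnt : Int}
    (hcore : BfsCore arr0 U c vis ss cnt) (hc : c ∈ ss)
    (hexp : ∀ x ∈ ss, x ∉ ([] : List (Int × Int)) → ∀ y, pvAdj arr0 x y → y ∈ U ∪ ss.toFinset) :
    ss.toFinset = pvComp arr0 c ∧ ss.Nodup ∧ cnt = ((pvComp arr0 c).card : Int) ∧
      pvVisSet vis = U ∪ pvComp arr0 c ∧ Shape5 vis := by
  obtain ⟨hsh, hvs, hnd, hsub, hcnt⟩ := hcore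
  have hcomp : ss.toFinset = pvComp arr0 c := by
    apply Finset.Subset.antisymm
    · intro x hx
      exact hsub x (List.mem_toFinset.1 hx)
    · have hclosedT : pvClosed arr0 (ss.toFinset ∪ U) := by
        intro x hx y hxy
        rcases Finset.mem_union.1 hx with hx | hx
        · have := hexp x (List.mem_toFinset.1 hx) (by simp) y hxy
          rcases Finset.mem_union.1 this with h | h
          · exact Finset.mem_union_right _ h
          · exact Finset.mem_union_left _ h
        · exact Finset.mem_union_right _ (hUclosed x hx y hxy)
      have hsubT := pvComp_min hclosedT
        (Finset.mem_union_left _ (List.mem_toFinset.2 hc))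
      intro x hx
      rcases Finset.mem_union.1 (hsubT hx) with h | h
      · exact h
      · exact absurd h (hdisj x hx)
  refine ⟨hcomp, hnd, ?_, by rw [hvs, hcomp], hsh⟩
  rw [hcnt, ← hcomp, List.toFinset_card_of_nodup hnd]

theorem bfsLoopA_correct (arr0 arrCur : List (List Int)) (U : Finset (Int × Int)) (c : Int × Int)
    (hagree : AgreeOff arr0 arrCur U) (hUclosed : pvClosed arr0 U) (hcg : c ∈ pvGrid)
    (hdisj : ∀ x ∈ pvComp arr0 c, x ∉ U) :
    ∀ (fuel : Nat) (vis : List (List Int)) (q ss : List (Int × Int)) (cnt : Int),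
      BfsCore arr0 U c vis ss cnt → c ∈ ss →
      (∀ x ∈ q, x ∈ ss) →
      (∀ x ∈ ss, x ∉ q → ∀ y, pvAdj arr0 x y → y ∈ U ∪ ss.toFinset) →
      q.length + 2 * (25 - ss.length) ≤ fuel →
      (bfsLoopA arrCur fuel vis q ss cnt).2.1.toFinset = pvComp arr0 c ∧
      (bfsLoopA arrCur fuel vis q ss cnt).2.1.Nodup ∧
      (bfsLoopA arrCur fuel vis q ss cnt).2.2 = ((pvComp arr0 c).card : Int) ∧
      pvVisSet (bfsLoopA arrCur fuel vis q ss cnt).1 = U ∪ pvComp arr0 c ∧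
      Shape5 (bfsLoopA arrCur fuel vis q ss cnt).1 := by
  intro fuel
  induction fuel with
  | zero =>
    intro vis q ss cnt hcore hc hq hexp hfuel
    have hqnil : q = [] := by
      cases q with
      | nil => rfl
      | cons a t => simp at hfuel
    subst hqnil
    have hred : bfsLoopA arrCur 0 vis [] ss cnt = (vis, ss, cnt) := rfl
    rw [hred]
    obtain ⟨h1, h2, h3, h4, h5⟩ := bfs_terminal hUclosed hdisj hcore hc hexp
    exact ⟨h1, h2, h3, h4, h5⟩
  | succ fuel ih =>
    intro vis q ss cnt hcore hc hq hexp hfuel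
    cases q with
    | nil =>
      have hred : bfsLoopA arrCur (fuel + 1) vis [] ss cnt = (vis, ss, cnt) := rfl
      rw [hred]
      obtain ⟨h1, h2, h3, h4, h5⟩ := bfs_terminal hUclosed hdisj hcore hc hexp
      exact ⟨h1, h2, h3, h4, h5⟩
    | cons hd rest =>
      obtain ⟨ci, cj⟩ := hd
      have hci : (ci, cj) ∈ ss := hq _ (by simp)
      obtain ⟨Δ, e1, e2, e3, e4⟩ := bfs_fold arr0 arrCur U c hagree hcg hdisj ci cj
        pvDirs (fun d hd => hd) vis rest ss cnt hcore hci
      obtain ⟨hsh', hvs', hnd', hsub', hcnt'⟩ := e3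
      have hlen' : (ss ++ Δ).length ≤ 25 := ss_len_le_25 hcg hnd' hsub'
      have hred : bfsLoopA arrCur (fuel + 1) vis ((ci, cj) :: rest) ss cnt =
          bfsLoopA arrCur fuel
            (pvDirs.foldl (fun st d =>
              let ni := ci + d.1
              let nj := cj + d.2
              if 0 ≤ ni ∧ ni < 5 ∧ 0 ≤ nj ∧ nj < 5 ∧ pvGet2 st.1 ni nj = some 0 ∧
                  pvGet2 arrCur ci cj = pvGet2 arrCur ni nj then
                (pvSet2 st.1 ni nj 1, st.2.1 ++ [(ni, nj)], PySem.Set.add st.2.2.1 (ni, nj),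
                  st.2.2.2 + 1)
              else st) (vis, rest, ss, cnt)).1
            (pvDirs.foldl (fun st d =>
              let ni := ci + d.1
              let nj := cj + d.2
              if 0 ≤ ni ∧ ni < 5 ∧ 0 ≤ nj ∧ nj < 5 ∧ pvGet2 st.1 ni nj = some 0 ∧
                  pvGet2 arrCur ci cj = pvGet2 arrCur ni nj then
                (pvSet2 st.1 ni nj 1, st.2.1 ++ [(ni, nj)], PySem.Set.add st.2.2.1 (ni, nj),
                  st.2.2.2 + 1)
              else st) (vis, rest, ss, cnt)).2.1
            (pvDirs.foldl (fun st d =>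
              let ni := ci + d.1
              let nj := cj + d.2
              if 0 ≤ ni ∧ ni < 5 ∧ 0 ≤ nj ∧ nj < 5 ∧ pvGet2 st.1 ni nj = some 0 ∧
                  pvGet2 arrCur ci cj = pvGet2 arrCur ni nj then
                (pvSet2 st.1 ni nj 1, st.2.1 ++ [(ni, nj)], PySem.Set.add st.2.2.1 (ni, nj),
                  st.2.2.2 + 1)
              else st) (vis, rest, ss, cnt)).2.2.1
            (pvDirs.foldl (fun st d =>
              let ni := ci + d.1
              let nj := cj + d.2
              if 0 ≤ ni ∧ ni < 5 ∧ 0 ≤ nj ∧ nj < 5 ∧ pvGet2 st.1 ni nj = some 0 ∧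
                  pvGet2 arrCur ci cj = pvGet2 arrCur ni nj then
                (pvSet2 st.1 ni nj 1, st.2.1 ++ [(ni, nj)], PySem.Set.add st.2.2.1 (ni, nj),
                  st.2.2.2 + 1)
              else st) (vis, rest, ss, cnt)).2.2.2 := rfl
      rw [hred, e1, e2]
      apply ih
      · exact ⟨hsh', hvs', hnd', hsub', hcnt'⟩
      · exact List.mem_append_left _ hc
      · intro x hx
        rcases List.mem_append.1 hx with hx | hx
        · exact List.mem_append_left _ (hq x (by simp [hx]))
        · exact List.mem_append_right _ hx
      · intro x hx hxq y hxy
        rcases List.mem_append.1 hx with hx | hx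
        · by_cases hxc : x = (ci, cj)
          · subst hxc
            have hdir : ((y.1 - ci, y.2 - cj) : Int × Int) ∈ pvDirs := hxy.2.2.1
            have hy : ((ci + (y.1 - ci), cj + (y.2 - cj)) : Int × Int) = y := by
              apply Prod.ext <;> simp
            have := e4 _ hdir (by rw [hy]; exact hxy)
            rw [hy] at this
            exact this
          · have hxrest : x ∉ rest := fun h => hxq (List.mem_append_left _ h)
            have hxq2 : x ∉ (ci, cj) :: rest := by
              simp [hxc, hxrest]
            have := hexp x hx hxq2 y hxy
            rcases Finset.mem_union.1 this with h | h
            · exact Finset.mem_union_left _ h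
            · apply Finset.mem_union_right
              rw [List.toFinset_append]
              exact Finset.mem_union_left _ h
        · exfalso
          exact hxq (List.mem_append_right _ hx)
      · have hlen2 : ss.length + Δ.length ≤ 25 := by simpa using hlen'
        have hf : ((ci, cj) :: rest).length + 2 * (25 - ss.length) ≤ fuel + 1 := hfuel
        simp at hf ⊢
        omega

theorem bfsA_correct (arr0 arrCur vis : List (List Int)) (U : Finset (Int × Int))
    (ci cj clear : Int)
    (hagree : AgreeOff arr0 arrCur U) (hUclosed : pvClosed arr0 U)
    (hPre : PreShape arrCur) (hsh : Shape5 vis) (hvs : pvVisSet vis = U)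
    (hcg : ((ci, cj) : Int × Int) ∈ pvGrid)
    (hdisj : ∀ x ∈ pvComp arr0 (ci, cj), x ∉ U) :
    Shape5 (bfsA arrCur vis ci cj clear).2.1 ∧
    pvVisSet (bfsA arrCur vis ci cj clear).2.1 = U ∪ pvComp arr0 (ci, cj) ∧
    AgreeOff arr0 (bfsA arrCur vis ci cj clear).1 (U ∪ pvComp arr0 (ci, cj)) ∧
    PreShape (bfsA arrCur vis ci cj clear).1 ∧
    (bfsA arrCur vis ci cj clear).2.2 =
      (if 3 ≤ (pvComp arr0 (ci, cj)).card then ((pvComp arr0 (ci, cj)).card : Int) else 0) := by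
  have hb : bfsA arrCur vis ci cj clear =
      (if (bfsLoopA arrCur 128 (pvSet2 vis ci cj 1) [(ci, cj)] [(ci, cj)] 1).2.2 ≥ 3 then
        if clear = 1 then
          ((bfsLoopA arrCur 128 (pvSet2 vis ci cj 1) [(ci, cj)] [(ci, cj)] 1).2.1.foldl
              (fun a (p : Int × Int) => pvSet2 a p.1 p.2 0) arrCur,
            (bfsLoopA arrCur 128 (pvSet2 vis ci cj 1) [(ci, cj)] [(ci, cj)] 1).1,
            (bfsLoopA arrCur 128 (pvSet2 vis ci cj 1) [(ci, cj)] [(ci, cj)] 1).2.2)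
        else (arrCur, (bfsLoopA arrCur 128 (pvSet2 vis ci cj 1) [(ci, cj)] [(ci, cj)] 1).1,
          (bfsLoopA arrCur 128 (pvSet2 vis ci cj 1) [(ci, cj)] [(ci, cj)] 1).2.2)
      else (arrCur, (bfsLoopA arrCur 128 (pvSet2 vis ci cj 1) [(ci, cj)] [(ci, cj)] 1).1, 0)) :=
    rfl
  have hcore : BfsCore arr0 U (ci, cj) (pvSet2 vis ci cj 1) [(ci, cj)] 1 := by
    refine ⟨Shape5_pvSet2 hsh hcg 1, ?_, List.nodup_singleton _, ?_, by simp⟩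
    · rw [show pvSet2 vis ci cj 1 =
          pvSet2 vis ((ci, cj) : Int × Int).1 ((ci, cj) : Int × Int).2 1 from rfl,
        pvVisSet_pvSet2_one hsh hcg, hvs]
      ext y
      simp [or_comm]
    · intro x hx
      rcases List.mem_singleton.1 hx with rfl
      exact mem_pvComp_self arr0 (ci, cj)
  obtain ⟨r1, r2, r3, r4, r5⟩ := bfsLoopA_correct arr0 arrCur U (ci, cj) hagree hUclosed hcg hdisj
    128 (pvSet2 vis ci cj 1) [(ci, cj)] [(ci, cj)] 1 hcore (by simp)
    (fun x hx => hx)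
    (by
      intro x hx hxq
      exact absurd hx hxq)
    (by simp)
  -- abbreviations
  have hcomp_grid : ∀ x ∈ (bfsLoopA arrCur 128 (pvSet2 vis ci cj 1) [(ci, cj)] [(ci, cj)] 1).2.1,
      x ∈ pvGrid := by
    intro x hx
    exact pvComp_subset_grid hcg (r1 ▸ List.mem_toFinset.2 hx)
  have hcnt_iff : ((bfsLoopA arrCur 128 (pvSet2 vis ci cj 1) [(ci, cj)] [(ci, cj)] 1).2.2 ≥ 3) ↔
      3 ≤ (pvComp arr0 (ci, cj)).card := by
    rw [r3]
    constructor
    · intro h; exact_mod_cast h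
    · intro h; exact_mod_cast h
  by_cases h3 : 3 ≤ (pvComp arr0 (ci, cj)).card
  · by_cases hcl : clear = 1
    · rw [hb, if_pos (hcnt_iff.2 h3), if_pos hcl]
      obtain ⟨hps, hpt⟩ := clear_foldl
        (bfsLoopA arrCur 128 (pvSet2 vis ci cj 1) [(ci, cj)] [(ci, cj)] 1).2.1 arrCur
        hcomp_grid hPre
      refine ⟨r5, r4, ?_, hps, by rw [r3, if_pos h3]⟩
      intro p hpg hpU
      have hpnotin : p ∉ (bfsLoopA arrCur 128 (pvSet2 vis ci cj 1) [(ci, cj)] [(ci, cj)] 1).2.1 := by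
        intro h
        exact hpU (Finset.mem_union_right _ (r1 ▸ List.mem_toFinset.2 h))
      rw [hpt p hpg hpnotin]
      exact hagree p hpg (fun h => hpU (Finset.mem_union_left _ h))
    · rw [hb, if_pos (hcnt_iff.2 h3), if_neg hcl]
      refine ⟨r5, r4, ?_, hPre, by rw [r3, if_pos h3]⟩
      intro p hpg hpU
      exact hagree p hpg (fun h => hpU (Finset.mem_union_left _ h))
  · rw [hb, if_neg (fun h => h3 (hcnt_iff.1 h))]
    refine ⟨r5, r4, ?_, hPre, by rw [if_neg h3]⟩
    intro p hpg hpU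
    exact hagree p hpg (fun h => hpU (Finset.mem_union_left _ h))

def pvStep (clear : Int) (st : List (List Int) × List (List Int) × Int) (p : Int × Int) :
    List (List Int) × List (List Int) × Int :=
  if pvGet2 st.2.1 p.1 p.2 = some 0 then
    ((bfsA st.1 st.2.1 p.1 p.2 clear).1, (bfsA st.1 st.2.1 p.1 p.2 clear).2.1,
      st.2.2 + (bfsA st.1 st.2.1 p.1 p.2 clear).2.2)
  else st

def pvVis0 : List (List Int) := (PySem.List.pyRange 0 5 1).map (fun _ => List.replicate 5 0)

theorem pvRange5 : PySem.List.pyRange 0 5 1 = (List.range 5).map (fun k => (k : Int)) := by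
  decide

theorem count_clear_eq_fold (arr : List (List Int)) (clear : Int) :
    count_clear arr clear = (pvGridL.foldl (pvStep clear) (arr, pvVis0, 0)).2.2 := by
  have hR : (pvGridL.foldl (pvStep clear) (arr, pvVis0, 0)) =
      (List.range 5).foldl (fun st i =>
        (List.range 5).foldl (fun st j => pvStep clear st ((i : Int), (j : Int))) st)
        (arr, pvVis0, 0) := by
    rw [pvGridL, List.foldl_flatMap]
    simp only [List.foldl_map]
  rw [hR]
  simp only [count_clear, pvRange5, List.foldl_map]
  apply congrArg (fun t : List (List Int) × List (List Int) × Int => t.2.2)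
  apply PySem.List.foldl_congr_mem
  intro acc i _
  apply PySem.List.foldl_congr_mem
  intro acc2 j _
  rw [pvStep]

theorem mem_pvGridL (p : Int × Int) : p ∈ pvGridL ↔ p ∈ pvGrid := List.mem_toFinset.symm

def OI (arr0 : List (List Int)) (ps : List (Int × Int))
    (st : List (List Int) × List (List Int) × Int) : Prop :=
  Shape5 st.2.1 ∧ pvVisSet st.2.1 = pvU arr0 ps ∧ AgreeOff arr0 st.1 (pvU arr0 ps) ∧
    PreShape st.1 ∧
    st.2.2 = (((pvU arr0 ps).filter (fun q => 3 ≤ (pvComp arr0 q).card)).card : Int)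

theorem card_filter_step (arr0 : List (List Int)) (ps : List (Int × Int)) (c : Int × Int)
    (hps : ∀ x ∈ ps, x ∈ pvGrid) (hc : c ∈ pvGrid) (hcU : c ∉ pvU arr0 ps) :
    (((pvU arr0 (ps ++ [c])).filter (fun q => 3 ≤ (pvComp arr0 q).card)).card : Int) =
      (((pvU arr0 ps).filter (fun q => 3 ≤ (pvComp arr0 q).card)).card : Int) +
      (if 3 ≤ (pvComp arr0 c).card then ((pvComp arr0 c).card : Int) else 0) := by
  rw [pvU_append, Finset.filter_union]
  have hdisjUC : Disjoint ((pvU arr0 ps).filter (fun q => 3 ≤ (pvComp arr0 q).card))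
      ((pvComp arr0 c).filter (fun q => 3 ≤ (pvComp arr0 q).card)) := by
    apply Finset.disjoint_left.2
    intro x hx hx'
    exact pvU_disj hps hc hcU x (Finset.mem_filter.1 hx').1 (Finset.mem_filter.1 hx).1
  rw [Finset.card_union_of_disjoint hdisjUC]
  have hcompf : (pvComp arr0 c).filter (fun q => 3 ≤ (pvComp arr0 q).card) =
      if 3 ≤ (pvComp arr0 c).card then pvComp arr0 c else ∅ := by
    split_ifs with h3
    · apply Finset.filter_true_of_mem
      intro x hx
      rw [pvComp_classes hc hx]
      exact h3
    · apply Finset.filter_false_of_mem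
      intro x hx
      rw [pvComp_classes hc hx]
      exact h3
  rw [hcompf]
  split_ifs with h3
  · push_cast
    ring
  · simp

theorem outer_step (arr0 : List (List Int)) (clear : Int) (ps : List (Int × Int))
    (st : List (List Int) × List (List Int) × Int) (c : Int × Int)
    (hps : ∀ x ∈ ps, x ∈ pvGrid) (hc : c ∈ pvGrid) (h : OI arr0 ps st) :
    OI arr0 (ps ++ [c]) (pvStep clear st c) := by
  obtain ⟨hsh, hvs, hagree, hPre, hcnt⟩ := h
  by_cases hv : pvGet2 st.2.1 c.1 c.2 = some 0
  · have hcU : c ∉ pvU arr0 ps := by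
      rw [← hvs]
      exact (notmem_pvVisSet hsh hc).2 hv
    have hdisj : ∀ x ∈ pvComp arr0 (c.1, c.2), x ∉ pvU arr0 ps := by
      intro x hx
      exact pvU_disj hps hc hcU x hx
    obtain ⟨b1, b2, b3, b4, b5⟩ := bfsA_correct arr0 st.1 st.2.1 (pvU arr0 ps) c.1 c.2 clear
      hagree (pvU_closed hps) hPre hsh hvs hc hdisj
    have hstep : pvStep clear st c =
        ((bfsA st.1 st.2.1 c.1 c.2 clear).1, (bfsA st.1 st.2.1 c.1 c.2 clear).2.1,
          st.2.2 + (bfsA st.1 st.2.1 c.1 c.2 clear).2.2) := by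
      rw [pvStep, if_pos hv]
    rw [hstep]
    refine ⟨b1, ?_, ?_, b4, ?_⟩
    · rw [b2, pvU_append]
    · rw [pvU_append]
      exact b3
    · rw [b5, hcnt, card_filter_step arr0 ps c hps hc hcU]
  · have hcU : c ∈ pvU arr0 ps := by
      rw [← hvs]
      exact mem_pvVisSet_of_ne hc hv
    have habs : pvU arr0 (ps ++ [c]) = pvU arr0 ps := by
      rw [pvU_append]
      exact Finset.union_eq_left.2 (pvU_absorb hps hcU)
    have hstep : pvStep clear st c = st := by
      rw [pvStep, if_neg hv]
    rw [hstep]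
    refine ⟨hsh, ?_, ?_, hPre, ?_⟩
    · rw [habs]; exact hvs
    · rw [habs]; exact hagree
    · rw [habs]; exact hcnt

theorem outer_fold (arr0 : List (List Int)) (clear : Int) :
    ∀ (l ps : List (Int × Int)) (st : List (List Int) × List (List Int) × Int),
      (∀ x ∈ l, x ∈ pvGrid) → (∀ x ∈ ps, x ∈ pvGrid) → OI arr0 ps st →
      OI arr0 (ps ++ l) (l.foldl (pvStep clear) st) := by
  intro l
  induction l with
  | nil => intro ps st _ _ h; simpa using h
  | cons c t ih =>
    intro ps st hl hps h
    have h1 := outer_step arr0 clear ps st c hps (hl c (by simp)) h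
    have h2 := ih (ps ++ [c]) (pvStep clear st c)
      (fun x hx => hl x (by simp [hx]))
      (by
        intro x hx
        rcases List.mem_append.1 hx with hx | hx
        · exact hps x hx
        · rcases List.mem_singleton.1 hx with rfl
          exact hl x (by simp))
      h1
    rw [List.foldl_cons]
    have : ps ++ [c] ++ t = ps ++ (c :: t) := by simp
    rw [← this]
    exact h2

theorem pvU_gridL (arr0 : List (List Int)) : pvU arr0 pvGridL = pvGrid := by
  apply Finset.Subset.antisymm
  · exact pvU_subset_grid (fun p hp => (mem_pvGridL p).1 hp)
  · intro x hx
    exact (mem_pvU arr0 pvGridL x).2 ⟨x, (mem_pvGridL x).2 hx, mem_pvComp_self arr0 x⟩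

theorem pvVis0_eq : pvVis0 = List.replicate 5 (List.replicate 5 0) := rfl

theorem pvVisSet_vis0 : pvVisSet pvVis0 = ∅ := by
  ext q
  rw [mem_pvVisSet]
  simp only [Finset.notMem_empty, iff_false, not_and, not_not]
  intro hg
  obtain ⟨hq1, hq2, hq3, hq4⟩ := (mem_pvGrid q).1 hg
  rw [pvVis0_eq, pvGet2_nonneg _ _ _ hq1 hq3]
  rw [List.getElem?_replicate, if_pos (show q.1.toNat < 5 by omega)]
  rw [Option.bind_some, List.getElem?_replicate, if_pos (show q.2.toNat < 5 by omega)]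

theorem count_clear_eq_card (arr0 : List (List Int)) (clear : Int) (hPre : PreShape arr0) :
    count_clear arr0 clear =
      ((pvGrid.filter (fun q => 3 ≤ (pvComp arr0 q).card)).card : Int) := by
  rw [count_clear_eq_fold]
  have hinit : OI arr0 [] (arr0, pvVis0, 0) := by
    refine ⟨?_, ?_, ?_, hPre, ?_⟩
    · show Shape5 pvVis0
      exact ⟨rfl, by decide⟩
    · show pvVisSet pvVis0 = pvU arr0 []
      have h0 : pvU arr0 [] = ∅ := rfl
      rw [h0]
      exact pvVisSet_vis0
    · intro p hp _
      rfl
    · show (0 : Int) = _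
      have h0 : pvU arr0 [] = ∅ := rfl
      rw [h0]
      simp
  have hof := outer_fold arr0 clear pvGridL [] (arr0, pvVis0, 0)
    (fun p hp => (mem_pvGridL p).1 hp) (by simp) hinit
  obtain ⟨-, -, -, -, h5⟩ := hof
  rw [h5]
  have hU : pvU arr0 ([] ++ pvGridL) = pvGrid := by
    rw [List.nil_append, pvU_gridL]
  rw [hU]

theorem mem_closStepB (arr : List (List Int)) (s : PySem.Set (Int × Int))
    (hg : ∀ x ∈ s, x ∈ pvGrid) (y : Int × Int) :
    y ∈ closStepB arr s ↔ y ∈ s ∨ (y ∈ pvGrid ∧ ∃ c ∈ s, pvAdj arr c y) := by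
  rw [closStepB, PySem.Set.mem_union]
  apply or_congr_right
  rw [List.mem_flatMap]
  constructor
  · rintro ⟨c, hc, hy⟩
    obtain ⟨d, hd, hfd⟩ := List.mem_filterMap.1 hy
    by_cases hcond : 0 ≤ c.1 + d.1 ∧ c.1 + d.1 < 5 ∧ 0 ≤ c.2 + d.2 ∧ c.2 + d.2 < 5 ∧
        pvGet2 arr (c.1 + d.1) (c.2 + d.2) = pvGet2 arr c.1 c.2
    · rw [if_pos hcond] at hfd
      obtain ⟨hb1, hb2, hb3, hb4, hval⟩ := hcond
      injection hfd with hfd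
      subst hfd
      have hyg : ((c.1 + d.1, c.2 + d.2) : Int × Int) ∈ pvGrid := by
        rw [mem_pvGrid]; exact ⟨hb1, hb2, hb3, hb4⟩
      refine ⟨hyg, c, hc, hg c hc, hyg, ?_, hval.symm⟩
      have : ((c.1 + d.1 - c.1, c.2 + d.2 - c.2) : Int × Int) = d := by
        apply Prod.ext <;> simp
      simpa [this] using hd
    · rw [if_neg hcond] at hfd
      exact absurd hfd (by simp)
  · rintro ⟨hyg, c, hc, hadj⟩
    refine ⟨c, hc, ?_⟩
    apply List.mem_filterMap.2
    refine ⟨(y.1 - c.1, y.2 - c.2), hadj.2.2.1, ?_⟩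
    obtain ⟨hy1, hy2, hy3, hy4⟩ := (mem_pvGrid y).1 hyg
    have he1 : c.1 + (y.1 - c.1) = y.1 := by ring
    have he2 : c.2 + (y.2 - c.2) = y.2 := by ring
    rw [if_pos]
    · rw [he1, he2]
    · rw [he1, he2]
      exact ⟨hy1, hy2, hy3, hy4, hadj.2.2.2.symm⟩

theorem closStepB_spec (arr : List (List Int)) (s : PySem.Set (Int × Int))
    (hnd : List.Nodup s) (hg : ∀ x ∈ s, x ∈ pvGrid) :
    (closStepB arr s).toFinset = pvF arr s.toFinset ∧ List.Nodup (closStepB arr s) ∧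
      (∀ x ∈ closStepB arr s, x ∈ pvGrid) := by
  have htf : (closStepB arr s).toFinset = pvF arr s.toFinset := by
    ext y
    rw [List.mem_toFinset, mem_closStepB arr s hg y, pvF, Finset.mem_union, Finset.mem_filter]
    apply or_congr
    · exact List.mem_toFinset.symm
    · constructor
      · rintro ⟨hyg, c, hc, hadj⟩
        exact ⟨hyg, c, List.mem_toFinset.2 hc, hadj⟩
      · rintro ⟨hyg, c, hc, hadj⟩
        exact ⟨hyg, c, List.mem_toFinset.1 hc, hadj⟩
  refine ⟨htf, PySem.Set.nodup_union s _ hnd, ?_⟩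
  intro x hx
  have : x ∈ (closStepB arr s).toFinset := List.mem_toFinset.2 hx
  rw [htf] at this
  exact pvF_subset_grid (by
    intro z hz
    exact hg z (List.mem_toFinset.1 hz)) this

theorem compB_fold (arr : List (List Int)) :
    ∀ (l : List Int) (s : PySem.Set (Int × Int)), List.Nodup s → (∀ x ∈ s, x ∈ pvGrid) →
      (l.foldl (fun s _ => closStepB arr s) s).toFinset = (pvF arr)^[l.length] s.toFinset ∧
      List.Nodup (l.foldl (fun s _ => closStepB arr s) s) ∧
      (∀ x ∈ l.foldl (fun s _ => closStepB arr s) s, x ∈ pvGrid) := by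
  intro l
  induction l with
  | nil => intro s hnd hg; exact ⟨rfl, hnd, hg⟩
  | cons a t ih =>
    intro s hnd hg
    obtain ⟨h1, h2, h3⟩ := closStepB_spec arr s hnd hg
    obtain ⟨ih1, ih2, ih3⟩ := ih (closStepB arr s) h2 h3
    refine ⟨?_, ih2, ih3⟩
    rw [List.foldl_cons] at *
    rw [ih1, h1, List.length_cons, Function.iterate_succ_apply]

theorem compB_spec (arr : List (List Int)) (p : Int × Int) (hp : p ∈ pvGrid) :
    (compB arr p.1 p.2).toFinset = pvComp arr p ∧ List.Nodup (compB arr p.1 p.2) := by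
  have hlen : (PySem.List.pyRange 0 25 1).length = 25 := by decide
  have hof : PySem.Set.ofList [(p.1, p.2)] = [(p.1, p.2)] := rfl
  have hstart : ([((p.1, p.2) : Int × Int)]).toFinset = ({p} : Finset (Int × Int)) := by
    simp
  obtain ⟨h1, h2, _⟩ := compB_fold arr (PySem.List.pyRange 0 25 1) [(p.1, p.2)]
    (List.nodup_singleton _) (by
      intro x hx
      rcases List.mem_singleton.1 hx with rfl
      simpa using hp)
  rw [hstart, hlen] at h1
  exact ⟨by rw [compB, hof, h1, pvComp], by rw [compB, hof]; exact h2⟩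

theorem pvGridL_nodup : List.Nodup pvGridL := by decide

theorem count_clear_alt_eq_card (arr : List (List Int)) (clear : Int) :
    count_clear_alt arr clear =
      ((pvGrid.filter (fun q => 3 ≤ (pvComp arr q).card)).card : Int) := by
  have hR : ((PySem.List.pyRange 0 5 1).foldl (fun acc i =>
      (PySem.List.pyRange 0 5 1).foldl (fun acc j =>
        if PySem.Set.len (compB arr i j) ≥ 3 then acc ++ [(i, j)] else acc) acc)
      ([] : List (Int × Int))) =
      pvGridL.foldl (fun acc p =>
        if PySem.Set.len (compB arr p.1 p.2) ≥ 3 then acc ++ [p] else acc) [] := by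
    rw [pvGridL, List.foldl_flatMap]
    simp only [List.foldl_map, pvRange5]
  have halt : count_clear_alt arr clear = PySem.List.len
      (pvGridL.foldl (fun acc p =>
        if PySem.Set.len (compB arr p.1 p.2) ≥ 3 then acc ++ [p] else acc) []) := by
    rw [count_clear_alt]
    rw [hR]
  rw [halt, PySem.List.foldl_append_ite_eq_filter, List.nil_append, PySem.List.len_eq]
  have hpred : ∀ p ∈ pvGridL,
      (decide (PySem.Set.len (compB arr p.1 p.2) ≥ 3) = true) ↔
        3 ≤ (pvComp arr p).card := by
    intro p hp
    obtain ⟨h1, h2⟩ := compB_spec arr p ((mem_pvGridL p).1 hp)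
    rw [PySem.Set.len_eq, ← List.toFinset_card_of_nodup h2, h1]
    simp only [ge_iff_le, decide_eq_true_eq]
    exact ⟨fun h => by exact_mod_cast h, fun h => by exact_mod_cast h⟩
  have hfin : (pvGridL.filter
      (fun p => decide (PySem.Set.len (compB arr p.1 p.2) ≥ 3))).toFinset =
      pvGrid.filter (fun q => 3 ≤ (pvComp arr q).card) := by
    ext q
    rw [List.mem_toFinset, List.mem_filter, Finset.mem_filter, mem_pvGridL]
    constructor
    · rintro ⟨hq, hd⟩
      exact ⟨hq, (hpred q ((mem_pvGridL q).2 hq)).1 hd⟩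
    · rintro ⟨hq, hd⟩
      exact ⟨hq, (hpred q ((mem_pvGridL q).2 hq)).2 hd⟩
  rw [← hfin, List.toFinset_card_of_nodup (List.Nodup.filter _ pvGridL_nodup)]

theorem Pre_to_PreShape {arr : List (List Int)} {clear : Int}
    (h : Pre_count_clear arr clear) : PreShape arr := by
  obtain ⟨h1, h2⟩ := h
  refine ⟨h1, ?_⟩
  intro i hi
  have hil : i < arr.length := by omega
  have hmem : arr[i] ∈ arr.take 5 := by
    apply List.mem_iff_getElem.2
    refine ⟨i, by simp; omega, ?_⟩
    rw [List.getElem_take]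
  have := h2 _ hmem
  rw [List.getD, List.getElem?_eq_getElem hil]
  simpa using this

-- ===== VERDICT (by name: the statement is the Claim_ definition above) =====
theorem count_clear_spec : Claim_equal_count_clear := by
  intro arr clear _ hpre
  show count_clear arr clear = count_clear_alt arr clear
  rw [count_clear_eq_card arr clear (Pre_to_PreShape hpre), count_clear_alt_eq_card]
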